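-- pv_equiv track=rewrite | github.com/rballachay/homework | COMP545/A2/code.py | skipgram_preprocessing
-- ===== SOURCE A (Python) =====
-- def build_current_surrounding_pairs(indices: "list[int]", window_size: int = 2):
--     # take every
--     currents = []
--     surroundings = []
--     for idx in range(window_size, len(indices) - window_size):
--         currents.append(indices[idx])
--
--         _surr = []
--         for i in range(-window_size, window_size + 1):
--             if i == 0:
--                 continue
--             _surr.append(indices[idx + i])
--         surroundings.append(_surr)
--     return surroundings, currents
--
-- def expand_surrounding_words(
--     ix_surroundings: "list[list[int]]", ix_current: "list[int]"
-- ):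
--     surrounding_expanded = [item for sublist in ix_surroundings for item in sublist]
--     current_expanded = [
--         elem for elem in ix_current for _ in range(len(ix_surroundings[0]))
--     ]
--     return surrounding_expanded, current_expanded
--
-- def skipgram_preprocessing(indices_list: "list[list[int]]", window_size: int = 2):
--     sources = []
--     targets = []
--     for i_list in indices_list:
--         surr, curr = build_current_surrounding_pairs(i_list, window_size)
--         surr, curr = expand_surrounding_words(surr, curr)
--         sources.extend(surr)
--         targets.extend(curr)
--     return sources, targets
-- ===== SOURCE B (Python) =====
-- def skipgram_preprocessing(indices_list: "list[list[int]]", window_size: int = 2):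
--     sources = []
--     targets = []
--     for i_list in indices_list:
--         for idx in range(window_size, len(i_list) - window_size):
--             center = i_list[idx]
--             for i in range(-window_size, window_size + 1):
--                 if i == 0:
--                     continue
--                 sources.append(i_list[idx + i])
--                 targets.append(center)
--     return sources, targets
-- ===== Notes on version B (the rewrite author's own statement) =====
-- stated objective: simpler
-- what changed: B fuses A's three-phase pipeline (build list-of-surrounding-lists + centers, flatten, repeat each center by len(surr[0])) into one streaming triple loop with no helpers and no intermediate list-of-lists.
import Mathlib
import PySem

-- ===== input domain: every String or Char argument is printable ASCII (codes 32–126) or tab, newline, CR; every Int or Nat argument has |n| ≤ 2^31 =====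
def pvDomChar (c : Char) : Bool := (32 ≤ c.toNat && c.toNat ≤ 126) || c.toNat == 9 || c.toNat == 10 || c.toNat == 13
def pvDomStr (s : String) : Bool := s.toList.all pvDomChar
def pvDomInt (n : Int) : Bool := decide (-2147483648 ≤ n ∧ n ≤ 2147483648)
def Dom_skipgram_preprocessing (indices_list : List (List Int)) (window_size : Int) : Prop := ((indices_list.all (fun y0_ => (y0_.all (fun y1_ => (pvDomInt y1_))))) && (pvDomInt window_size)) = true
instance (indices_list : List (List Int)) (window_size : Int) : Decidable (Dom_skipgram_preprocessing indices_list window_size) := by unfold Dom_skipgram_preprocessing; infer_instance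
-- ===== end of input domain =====

-- B fuses A's build/flatten/expand pipeline into one streaming triple loop (objective: simpler).

-- ===== PORT A =====
def pvBuildPairs (indices : List Int) (window_size : Int) : List (List Int) × List Int :=
  (PySem.List.pyRange window_size ((indices.length : Int) - window_size) 1).foldl
    (fun st idx =>
      let currents := st.2 ++ [PySem.List.pyGetD indices idx 0]
      let surr := (PySem.List.pyRange (-window_size) (window_size + 1) 1).foldl
        (fun acc i => if i = 0 then acc else acc ++ [PySem.List.pyGetD indices (idx + i) 0]) []
      (st.1 ++ [surr], currents))
    ([], [])

def pvExpand (ix_surroundings : List (List Int)) (ix_current : List Int) : List Int × List Int :=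
  (ix_surroundings.flatMap (fun sub => sub),
   ix_current.flatMap (fun e => List.replicate (PySem.List.pyGetD ix_surroundings 0 []).length e))

def skipgram_preprocessing (indices_list : List (List Int)) (window_size : Int) : List Int × List Int :=
  indices_list.foldl
    (fun st i_list =>
      let bc := pvBuildPairs i_list window_size
      let ec := pvExpand bc.1 bc.2
      (st.1 ++ ec.1, st.2 ++ ec.2))
    ([], [])

-- ===== PORT B =====
def skipgram_preprocessing_alt (indices_list : List (List Int)) (window_size : Int) : List Int × List Int :=
  indices_list.foldl
    (fun st i_list =>
      (PySem.List.pyRange window_size ((i_list.length : Int) - window_size) 1).foldl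
        (fun st2 idx =>
          let center := PySem.List.pyGetD i_list idx 0
          (PySem.List.pyRange (-window_size) (window_size + 1) 1).foldl
            (fun st3 i =>
              if i = 0 then st3
              else (st3.1 ++ [PySem.List.pyGetD i_list (idx + i) 0], st3.2 ++ [center]))
            st2)
        st)
    ([], [])

-- ===== PRECONDITION & SPEC =====
-- Pre_ excludes only inputs where Python A raises IndexError: a negative window_size with a
-- nonempty indices_list makes the idx range overrun every sentence.
def Pre_skipgram_preprocessing (indices_list : List (List Int)) (window_size : Int) : Prop :=
  0 ≤ window_size ∨ indices_list = []
instance (indices_list : List (List Int)) (window_size : Int) : Decidable (Pre_skipgram_preprocessing indices_list window_size) := by unfold Pre_skipgram_preprocessing; infer_instance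
def pvWitness_skipgram_preprocessing : List (List Int) × Int := ([[1, 2, 3, 4, 5], [6, 7, 8]], 2)

def Spec_skipgram_preprocessing (indices_list : List (List Int)) (window_size : Int) (out : List Int × List Int) : Prop := out = skipgram_preprocessing_alt indices_list window_size
instance (indices_list : List (List Int)) (window_size : Int) (out : List Int × List Int) : Decidable (Spec_skipgram_preprocessing indices_list window_size out) := by unfold Spec_skipgram_preprocessing; infer_instance

-- ===== CLAIM (what is proved, stated in full; the proofs are below) =====
def Claim_equal_skipgram_preprocessing : Prop := ∀ (indices_list : List (List Int)) (window_size : Int), Dom_skipgram_preprocessing indices_list window_size → Pre_skipgram_preprocessing indices_list window_size → Spec_skipgram_preprocessing indices_list window_size (skipgram_preprocessing indices_list window_size)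

-- ===== LEMMAS AND PROOFS =====

theorem pv_flatMap_single {α β : Type} (L : List α) (f : α → β) :
    L.flatMap (fun x => [f x]) = L.map f := by
  induction L with
  | nil => rfl
  | cons a t ih => simp [ih]

theorem pv_foldl_pair_append {α β γ : Type} (L : List α) (F : α → List β) (G : α → List γ) (st : List β × List γ) :
    L.foldl (fun st x => (st.1 ++ F x, st.2 ++ G x)) st = (st.1 ++ L.flatMap F, st.2 ++ L.flatMap G) := by
  induction L generalizing st with
  | nil => simp
  | cons a t ih => simp [List.foldl_cons, ih]

theorem pv_inner_single (I : List Int) (h : Int → Int) (acc : List Int) :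
    I.foldl (fun acc i => if i = 0 then acc else acc ++ [h i]) acc
      = acc ++ (I.filter (fun i => decide (i ≠ 0))).map h := by
  induction I generalizing acc with
  | nil => simp
  | cons a t ih => by_cases ha : a = 0 <;> simp [ha, ih]

theorem pv_inner_pair (I : List Int) (h : Int → Int) (c : Int) (st : List Int × List Int) :
    I.foldl (fun st3 i => if i = 0 then st3 else (st3.1 ++ [h i], st3.2 ++ [c])) st
      = (st.1 ++ (I.filter (fun i => decide (i ≠ 0))).map h,
         st.2 ++ (I.filter (fun i => decide (i ≠ 0))).map (fun _ => c)) := by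
  induction I generalizing st with
  | nil => simp
  | cons a t ih => by_cases ha : a = 0 <;> simp [ha, ih]

-- shared notation for the per-sentence pieces
def pvL (il : List Int) (ws : Int) : List Int := PySem.List.pyRange ws ((il.length : Int) - ws) 1
def pvFilt (ws : Int) : List Int := (PySem.List.pyRange (-ws) (ws + 1) 1).filter (fun i => decide (i ≠ 0))
def pvSurr (il : List Int) (ws idx : Int) : List Int := (pvFilt ws).map (fun i => PySem.List.pyGetD il (idx + i) 0)
def pvCtr (il : List Int) (idx : Int) : Int := PySem.List.pyGetD il idx 0

theorem pv_chunkA (il : List Int) (ws : Int) :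
    (let bc := pvBuildPairs il ws; pvExpand bc.1 bc.2)
      = ((pvL il ws).flatMap (pvSurr il ws),
         (pvL il ws).flatMap (fun idx => List.replicate (pvFilt ws).length (pvCtr il idx))) := by
  have hb : pvBuildPairs il ws = ((pvL il ws).map (pvSurr il ws), (pvL il ws).map (pvCtr il)) := by
    unfold pvBuildPairs
    have hbody : (fun (st : List (List Int) × List Int) idx =>
        let currents := st.2 ++ [PySem.List.pyGetD il idx 0]
        let surr := (PySem.List.pyRange (-ws) (ws + 1) 1).foldl
          (fun acc i => if i = 0 then acc else acc ++ [PySem.List.pyGetD il (idx + i) 0]) []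
        (st.1 ++ [surr], currents))
        = fun st idx => (st.1 ++ [pvSurr il ws idx], st.2 ++ [pvCtr il idx]) := by
      funext st idx
      simp [pv_inner_single, pvSurr, pvCtr, pvFilt]
    rw [hbody, pv_foldl_pair_append]
    simp [pvL, pv_flatMap_single]
  rw [hb]
  cases hL : pvL il ws with
  | nil => simp [pvExpand]
  | cons a t =>
    simp only [pvExpand, List.map_cons]
    have h0 : PySem.List.pyGetD (pvSurr il ws a :: List.map (pvSurr il ws) t) 0 [] = pvSurr il ws a := by
      simp [PySem.List.pyGetD, PySem.List.pyGet?, PySem.List.pyIdx?]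
    rw [h0]
    apply Prod.ext <;> simp [pvSurr, List.flatMap_map] <;> rfl

theorem pv_chunkB (il : List Int) (ws : Int) (st : List Int × List Int) :
    (pvL il ws).foldl
        (fun st2 idx =>
          let center := PySem.List.pyGetD il idx 0
          (PySem.List.pyRange (-ws) (ws + 1) 1).foldl
            (fun st3 i =>
              if i = 0 then st3
              else (st3.1 ++ [PySem.List.pyGetD il (idx + i) 0], st3.2 ++ [center]))
            st2)
        st
      = (st.1 ++ (pvL il ws).flatMap (pvSurr il ws),
         st.2 ++ (pvL il ws).flatMap (fun idx => List.replicate (pvFilt ws).length (pvCtr il idx))) := by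
  have hbody : (fun (st2 : List Int × List Int) idx =>
      let center := PySem.List.pyGetD il idx 0
      (PySem.List.pyRange (-ws) (ws + 1) 1).foldl
        (fun st3 i =>
          if i = 0 then st3
          else (st3.1 ++ [PySem.List.pyGetD il (idx + i) 0], st3.2 ++ [center]))
        st2)
      = fun st2 idx => (st2.1 ++ pvSurr il ws idx,
                        st2.2 ++ List.replicate (pvFilt ws).length (pvCtr il idx)) := by
    funext st2 idx
    simp [pv_inner_pair, pvSurr, pvCtr, pvFilt, List.map_const']
  rw [hbody, pv_foldl_pair_append]

theorem pv_top (ls : List (List Int)) (ws : Int) (st : List Int × List Int) :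
    ls.foldl
        (fun st i_list =>
          let bc := pvBuildPairs i_list ws
          let ec := pvExpand bc.1 bc.2
          (st.1 ++ ec.1, st.2 ++ ec.2))
        st
      = ls.foldl
        (fun st i_list =>
          (PySem.List.pyRange ws ((i_list.length : Int) - ws) 1).foldl
            (fun st2 idx =>
              let center := PySem.List.pyGetD i_list idx 0
              (PySem.List.pyRange (-ws) (ws + 1) 1).foldl
                (fun st3 i =>
                  if i = 0 then st3
                  else (st3.1 ++ [PySem.List.pyGetD i_list (idx + i) 0], st3.2 ++ [center]))
                st2)
            st)
        st := by
  induction ls generalizing st with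
  | nil => rfl
  | cons a t ih =>
    simp only [List.foldl_cons]
    rw [show (PySem.List.pyRange ws ((a.length : Int) - ws) 1) = pvL a ws from rfl, pv_chunkB,
        pv_chunkA]
    exact ih _

-- ===== VERDICT (by name: the statement is the Claim_ definition above) =====
theorem skipgram_preprocessing_spec : Claim_equal_skipgram_preprocessing := by
  intro indices_list window_size _ _
  unfold Spec_skipgram_preprocessing skipgram_preprocessing skipgram_preprocessing_alt
  exact pv_top indices_list window_size ([], [])
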